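-- pv_equiv track=rewrite | github.com/MingyiLiuProject/thermometer | main.py | pick_two
-- ===== SOURCE A (Python) =====
-- from typing import Dict, Optional, List, Tuple
--
-- def pick_two(files_map: Dict[str, str]) -> Dict[str, str]:
--     preferred = ["Lab_inside", "Lab_outside"]
--     chosen: Dict[str, str] = {}
--     for p in preferred:
--         if p in files_map and len(chosen) < 2:
--             chosen[p] = files_map[p]
--     if len(chosen) < 2:
--         for k, v in files_map.items():
--             if k not in chosen:
--                 chosen[k] = v
--             if len(chosen) >= 2:
--                 break
--     return chosen
-- ===== SOURCE B (Python) =====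
-- def pick_two(files_map):
--     rank = {"Lab_inside": 0, "Lab_outside": 1}
--     ordered = sorted(files_map.items(), key=lambda kv: rank.get(kv[0], 2))
--     return dict(ordered[:2])
-- ===== Notes on version B (the rewrite author's own statement) =====
-- stated objective: alternative
-- what changed: B replaces A's two guarded accumulation loops with an early break by a single stable sort of the items under a 3-valued priority key (Lab_inside=0, Lab_outside=1, other=2) followed by a [:2] slice into dict().
import Mathlib
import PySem

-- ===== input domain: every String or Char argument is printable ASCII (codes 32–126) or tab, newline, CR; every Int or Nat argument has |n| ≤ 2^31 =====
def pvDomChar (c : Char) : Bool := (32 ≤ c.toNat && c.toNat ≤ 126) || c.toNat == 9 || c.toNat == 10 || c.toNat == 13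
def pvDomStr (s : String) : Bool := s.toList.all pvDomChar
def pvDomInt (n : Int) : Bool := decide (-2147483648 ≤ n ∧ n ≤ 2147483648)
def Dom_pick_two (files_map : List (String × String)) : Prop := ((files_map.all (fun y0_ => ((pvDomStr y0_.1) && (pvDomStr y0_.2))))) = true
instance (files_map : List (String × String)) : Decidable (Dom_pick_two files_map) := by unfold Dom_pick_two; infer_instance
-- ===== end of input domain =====

-- B is an alternative algorithm: one stable sort of the items under a 3-valued priority key
-- (Lab_inside=0, Lab_outside=1, other=2) and a [:2] slice replace A's two guarded
-- accumulation loops with an early break.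

-- ===== PORT A =====
-- the inner 'for k, v in files_map.items(): …' loop of A, with its break
def pvFillA (rest : List (String × String)) (chosen : PySem.Dict String String) :
    PySem.Dict String String :=
  match rest with
  | [] => chosen
  | (k, v) :: rest =>
    let chosen := if chosen.contains k then chosen else chosen.insert k v
    if 2 ≤ chosen.size then chosen else pvFillA rest chosen

def pick_two (files_map : List (String × String)) : List (String × String) :=
  let fm : PySem.Dict String String := PySem.Dict.mk files_map
  let preferred : List String := ["Lab_inside", "Lab_outside"]
  let chosen : PySem.Dict String String :=
    preferred.foldl
      (fun c p => if fm.contains p && decide (c.size < 2) then c.insert p (fm.getD p "") else c)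
      PySem.Dict.empty
  let chosen := if chosen.size < 2 then pvFillA files_map chosen else chosen
  chosen.items

-- ===== PORT B =====
def pick_two_alt (files_map : List (String × String)) : List (String × String) :=
  let fm : PySem.Dict String String := PySem.Dict.mk files_map
  let rank : PySem.Dict String Int := PySem.Dict.mk [("Lab_inside", 0), ("Lab_outside", 1)]
  let ordered : List (String × String) :=
    PySem.List.sorted fm.items (fun kv => rank.getD kv.1 2)
  (PySem.Dict.ofList (PySem.List.slice ordered none (some 2))).items

-- ===== PRECONDITION & SPEC =====
-- Pre_ restricts to association lists with pairwise-distinct keys: the Python argument is a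
-- dict, whose keys are necessarily distinct, so this excludes no actual Python input.
def Pre_pick_two (files_map : List (String × String)) : Prop :=
  (files_map.map Prod.fst).Nodup
instance (files_map : List (String × String)) : Decidable (Pre_pick_two files_map) := by
  unfold Pre_pick_two; infer_instance
def pvWitness_pick_two : (List (String × String)) :=
  [("Lab_inside", "a.txt"), ("x", "b.txt"), ("y", "c.txt")]

def Spec_pick_two (files_map : List (String × String)) (out : List (String × String)) : Prop := out = pick_two_alt files_map
instance (files_map : List (String × String)) (out : List (String × String)) : Decidable (Spec_pick_two files_map out) := by unfold Spec_pick_two; infer_instance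

-- ===== CLAIM (what is proved, stated in full; the proofs are below) =====
def Claim_equal_pick_two : Prop := ∀ (files_map : List (String × String)), Dom_pick_two files_map → Pre_pick_two files_map → Spec_pick_two files_map (pick_two files_map)

-- ===== LEMMAS AND PROOFS =====

-- the priority key of B, written out
def pvKey (kv : String × String) : Int :=
  if kv.1 == "Lab_inside" then 0 else if kv.1 == "Lab_outside" then 1 else 2

theorem rank_getD (k : String) :
    (PySem.Dict.mk [("Lab_inside", (0 : Int)), ("Lab_outside", 1)]).getD k 2
      = if k == "Lab_inside" then 0 else if k == "Lab_outside" then 1 else 2 := by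
  by_cases h1 : k = "Lab_inside"
  · subst h1; decide
  · by_cases h2 : k = "Lab_outside"
    · subst h2; decide
    · simp [PySem.Dict.getD_eq_get?_getD, PySem.Dict.get?,
        Ne.symm h1, Ne.symm h2, h1, h2]

theorem insertBy_notBefore_append {α : Type} (before : α → α → Bool) (x : α) (u v : List α)
    (hu : ∀ y ∈ u, before x y = false) :
    PySem.List.insertBy before x (u ++ v) = u ++ PySem.List.insertBy before x v := by
  induction u with
  | nil => simp
  | cons a u ih =>
    simp only [List.cons_append, PySem.List.insertBy, hu a (by simp), Bool.false_eq_true,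
      if_false]
    exact congrArg (a :: ·) (ih fun y hy => hu y (by simp [hy]))

theorem insertBy_cons_of_before {α : Type} (before : α → α → Bool) (x y : α) (ys : List α)
    (h : before x y = true) :
    PySem.List.insertBy before x (y :: ys) = x :: y :: ys := by
  simp [PySem.List.insertBy, h]

-- stable sort under a {0,1,2}-valued key is the concatenation of the three buckets
theorem sorted_bucket3 {α : Type} (key : α → Int) (xs : List α)
    (h : ∀ x ∈ xs, key x = 0 ∨ key x = 1 ∨ key x = 2) :
    PySem.List.sorted xs key false =
      xs.filter (fun x => key x == 0) ++ xs.filter (fun x => key x == 1)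
        ++ xs.filter (fun x => key x == 2) := by
  induction xs using List.reverseRecOn with
  | nil => simp [PySem.List.sorted_eq_foldl_insertBy]
  | append_singleton xs x ih =>
    have hk : ∀ y ∈ xs, key y = 0 ∨ key y = 1 ∨ key y = 2 := fun y hy => h y (by simp [hy])
    have hsx : PySem.List.sorted (xs ++ [x]) key false =
        PySem.List.insertBy (fun a b => decide (key a < key b)) x
          (PySem.List.sorted xs key false) := by
      rw [PySem.List.sorted_eq_foldl_insertBy, PySem.List.sorted_eq_foldl_insertBy,
        List.foldl_append]
      rfl
    have hmem0 : ∀ y ∈ xs.filter (fun z => key z == 0), key y = 0 := by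
      intro y hy; simpa using (List.mem_filter.mp hy).2
    have hmem1 : ∀ y ∈ xs.filter (fun z => key z == 1), key y = 1 := by
      intro y hy; simpa using (List.mem_filter.mp hy).2
    have hmem2 : ∀ y ∈ xs.filter (fun z => key z == 2), key y = 2 := by
      intro y hy; simpa using (List.mem_filter.mp hy).2
    rw [hsx, ih hk]
    rcases h x (by simp) with h0 | h1 | h2
    · have hstep := insertBy_notBefore_append (fun a b => decide (key a < key b)) x
        (xs.filter (fun z => key z == 0))
        (xs.filter (fun z => key z == 1) ++ xs.filter (fun z => key z == 2))
        (by intro y hy; simp [hmem0 y hy, h0])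
      rw [List.append_assoc, hstep]
      have htail : PySem.List.insertBy (fun a b => decide (key a < key b)) x
          (xs.filter (fun z => key z == 1) ++ xs.filter (fun z => key z == 2))
          = x :: (xs.filter (fun z => key z == 1) ++ xs.filter (fun z => key z == 2)) := by
        cases hv : xs.filter (fun z => key z == 1) ++ xs.filter (fun z => key z == 2) with
        | nil => simp [PySem.List.insertBy]
        | cons y t =>
          have hy : y ∈ xs.filter (fun z => key z == 1) ++ xs.filter (fun z => key z == 2) := by
            rw [hv]; exact List.mem_cons_self
          have : key y = 1 ∨ key y = 2 := by
            rcases List.mem_append.mp hy with hy1 | hy2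
            · exact Or.inl (hmem1 y hy1)
            · exact Or.inr (hmem2 y hy2)
          apply insertBy_cons_of_before
          rcases this with hh | hh <;> simp [hh, h0]
      rw [htail]
      simp [List.filter_append, h0]
    · have hstep := insertBy_notBefore_append (fun a b => decide (key a < key b)) x
        (xs.filter (fun z => key z == 0) ++ xs.filter (fun z => key z == 1))
        (xs.filter (fun z => key z == 2))
        (by
          intro y hy
          rcases List.mem_append.mp hy with hy0 | hy1
          · simp [hmem0 y hy0, h1]
          · simp [hmem1 y hy1, h1])
      rw [hstep]
      have htail : PySem.List.insertBy (fun a b => decide (key a < key b)) x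
          (xs.filter (fun z => key z == 2)) = x :: xs.filter (fun z => key z == 2) := by
        cases hv : xs.filter (fun z => key z == 2) with
        | nil => simp [PySem.List.insertBy]
        | cons y t =>
          have hy : y ∈ xs.filter (fun z => key z == 2) := by
            rw [hv]; exact List.mem_cons_self
          apply insertBy_cons_of_before
          simp [hmem2 y hy, h1]
      rw [htail]
      simp [List.filter_append, h1]
    · have hstep := PySem.List.insertBy_of_forall_not_before
        (fun a b => decide (key a < key b)) x
        (xs.filter (fun z => key z == 0) ++ xs.filter (fun z => key z == 1)
          ++ xs.filter (fun z => key z == 2))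
        (by
          intro y hy
          rcases List.mem_append.mp hy with hy01 | hy2
          · rcases List.mem_append.mp hy01 with hy0 | hy1
            · simp [hmem0 y hy0, h2]
            · simp [hmem1 y hy1, h2]
          · simp [hmem2 y hy2, h2])
      rw [hstep]
      simp [List.filter_append, h2]

theorem filter_fst_eq_singleton (l : List (String × String)) (k0 : String) (v : String)
    (hnd : (l.map Prod.fst).Nodup) (hm : (k0, v) ∈ l) :
    l.filter (fun p => p.1 == k0) = [(k0, v)] := by
  induction l with
  | nil => cases hm
  | cons a t ih =>
    simp only [List.map_cons, List.nodup_cons, List.mem_map] at hnd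
    rcases List.mem_cons.mp hm with rfl | hmt
    · have : t.filter (fun p => p.1 == k0) = [] := by
        apply List.filter_eq_nil_iff.mpr
        intro p hp
        simp only [beq_iff_eq]
        intro h; exact hnd.1 ⟨p, hp, h⟩
      simp [this]
    · have ha : a.1 ≠ k0 := by
        intro h
        exact hnd.1 ⟨(k0, v), hmt, by simp [h]⟩
      rw [List.filter_cons_of_neg (by simp [ha])]
      exact ih hnd.2 hmt

-- the common normal form both programs reduce to
def pvTarget (l : List (String × String)) : List (String × String) :=
  (l.filter (fun p => p.1 == "Lab_inside") ++ l.filter (fun p => p.1 == "Lab_outside")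
    ++ l.filter (fun p => !(p.1 == "Lab_inside") && !(p.1 == "Lab_outside"))).take 2

theorem items_empty : (PySem.Dict.empty : PySem.Dict String String).items = [] := by
  simp [PySem.Dict.empty]

theorem one_items (k0 x : String) : (PySem.Dict.empty.insert k0 x).items = [(k0, x)] := by
  simp [PySem.Dict.items_insert_of_not_contains, PySem.Dict.empty]

theorem pvFillA_one (l : List (String × String)) (k0 x : String) :
    (pvFillA l (PySem.Dict.empty.insert k0 x)).items
      = (k0, x) :: (l.filter (fun p => p.1 != k0)).take 1 := by
  induction l with
  | nil => simp [pvFillA, one_items]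
  | cons hd tl ih =>
    obtain ⟨k, v⟩ := hd
    by_cases hk : k = k0
    · subst hk
      simpa [pvFillA, PySem.Dict.contains_insert, PySem.Dict.size, one_items] using ih
    · simp [pvFillA, PySem.Dict.contains_insert, PySem.Dict.size, hk,
        PySem.Dict.items_insert_of_not_contains, PySem.Dict.empty]

theorem pvFillA_zero (l : List (String × String)) (hnd : (l.map Prod.fst).Nodup) :
    (pvFillA l PySem.Dict.empty).items = l.take 2 := by
  cases l with
  | nil => simp [pvFillA, PySem.Dict.empty]
  | cons hd tl =>
    obtain ⟨k, v⟩ := hd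
    have hfil : List.filter (fun p => p.1 != k) tl = tl := by
      apply List.filter_eq_self.mpr
      intro p hp
      simp only [List.map_cons, List.nodup_cons, List.mem_map] at hnd
      simp only [bne_iff_ne, ne_eq]
      intro h; exact hnd.1 ⟨p, hp, h⟩
    have hsz : (PySem.Dict.empty.insert k v).size = 1 := by
      simp [PySem.Dict.size, one_items]
    simp only [pvFillA, PySem.Dict.contains_empty, Bool.false_eq_true, if_false, hsz]
    rw [if_neg (by omega)]
    rw [pvFillA_one, hfil]
    cases tl <;> simp

theorem getD_mk_of_mem (l : List (String × String)) (k0 v : String)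
    (hnd : (l.map Prod.fst).Nodup) (hm : (k0, v) ∈ l) :
    (PySem.Dict.mk l).getD k0 "" = v := by
  apply PySem.Dict.getD_of_mem_items
  · exact hm
  · simpa [PySem.Dict.keys_mk] using hnd

-- A reduces to the normal form
theorem pick_two_eq_target (l : List (String × String)) (hnd : (l.map Prod.fst).Nodup) :
    pick_two l = pvTarget l := by
  by_cases h1 : ∃ v, ("Lab_inside", v) ∈ l
  · obtain ⟨v1, hv1⟩ := h1
    have hc1 : (l.any fun p => p.1 == "Lab_inside") = true :=
      List.any_eq_true.mpr ⟨_, hv1, by simp⟩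
    have hf0 : l.filter (fun p => p.1 == "Lab_inside") = [("Lab_inside", v1)] :=
      filter_fst_eq_singleton l _ _ hnd hv1
    have hg1 : (PySem.Dict.mk l).getD "Lab_inside" "" = v1 := getD_mk_of_mem l _ _ hnd hv1
    by_cases h2 : ∃ v, ("Lab_outside", v) ∈ l
    · obtain ⟨v2, hv2⟩ := h2
      have hc2 : (l.any fun p => p.1 == "Lab_outside") = true :=
        List.any_eq_true.mpr ⟨_, hv2, by simp⟩
      have hf1 : l.filter (fun p => p.1 == "Lab_outside") = [("Lab_outside", v2)] :=
        filter_fst_eq_singleton l _ _ hnd hv2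
      have hg2 : (PySem.Dict.mk l).getD "Lab_outside" "" = v2 := getD_mk_of_mem l _ _ hnd hv2
      simp [pick_two, pvTarget, hc1, hc2, hf0, hf1, hg1, hg2, PySem.Dict.size,
        items_empty, PySem.Dict.items_insert_of_not_contains, PySem.Dict.contains_insert]
    · have hno2 : ∀ p ∈ l, p.1 ≠ "Lab_outside" := by
        intro p hp h
        exact h2 ⟨p.2, by rwa [← h, Prod.mk.eta]⟩
      have hc2 : (l.any fun p => p.1 == "Lab_outside") = false := by
        simp only [List.any_eq_false]
        intro p hp; simp [hno2 p hp]
      have hf1 : l.filter (fun p => p.1 == "Lab_outside") = [] := by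
        apply List.filter_eq_nil_iff.mpr
        intro p hp; simp [hno2 p hp]
      have hf2 : l.filter (fun p => !(p.1 == "Lab_inside") && !(p.1 == "Lab_outside"))
          = l.filter (fun p => p.1 != "Lab_inside") := by
        apply List.filter_congr
        intro p hp
        simp [hno2 p hp, bne]
      simp [pick_two, pvTarget, hc1, hc2, hf0, hf1, hf2, hg1, PySem.Dict.size, one_items,
        items_empty, pvFillA_one]
  · have hno1 : ∀ p ∈ l, p.1 ≠ "Lab_inside" := by
      intro p hp h
      exact h1 ⟨p.2, by rwa [← h, Prod.mk.eta]⟩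
    have hc1 : (l.any fun p => p.1 == "Lab_inside") = false := by
      simp only [List.any_eq_false]
      intro p hp; simp [hno1 p hp]
    have hf0 : l.filter (fun p => p.1 == "Lab_inside") = [] := by
      apply List.filter_eq_nil_iff.mpr
      intro p hp; simp [hno1 p hp]
    by_cases h2 : ∃ v, ("Lab_outside", v) ∈ l
    · obtain ⟨v2, hv2⟩ := h2
      have hc2 : (l.any fun p => p.1 == "Lab_outside") = true :=
        List.any_eq_true.mpr ⟨_, hv2, by simp⟩
      have hf1 : l.filter (fun p => p.1 == "Lab_outside") = [("Lab_outside", v2)] :=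
        filter_fst_eq_singleton l _ _ hnd hv2
      have hg2 : (PySem.Dict.mk l).getD "Lab_outside" "" = v2 := getD_mk_of_mem l _ _ hnd hv2
      have hf2 : l.filter (fun p => !(p.1 == "Lab_inside") && !(p.1 == "Lab_outside"))
          = l.filter (fun p => p.1 != "Lab_outside") := by
        apply List.filter_congr
        intro p hp
        simp [hno1 p hp, bne]
      simp [pick_two, pvTarget, hc1, hc2, hf0, hf1, hf2, hg2, PySem.Dict.size, one_items,
        items_empty, pvFillA_one]
    · have hno2 : ∀ p ∈ l, p.1 ≠ "Lab_outside" := by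
        intro p hp h
        exact h2 ⟨p.2, by rwa [← h, Prod.mk.eta]⟩
      have hc2 : (l.any fun p => p.1 == "Lab_outside") = false := by
        simp only [List.any_eq_false]
        intro p hp; simp [hno2 p hp]
      have hf1 : l.filter (fun p => p.1 == "Lab_outside") = [] := by
        apply List.filter_eq_nil_iff.mpr
        intro p hp; simp [hno2 p hp]
      have hf2 : l.filter (fun p => !(p.1 == "Lab_inside") && !(p.1 == "Lab_outside")) = l := by
        apply List.filter_eq_self.mpr
        intro p hp; simp [hno1 p hp, hno2 p hp]
      simp [pick_two, pvTarget, hc1, hc2, hf0, hf1, hf2, PySem.Dict.size, items_empty,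
        pvFillA_zero l hnd]

-- B reduces to the normal form
theorem pick_two_alt_eq_target (l : List (String × String)) (hnd : (l.map Prod.fst).Nodup) :
    pick_two_alt l = pvTarget l := by
  have hkey : (fun kv : String × String =>
      (PySem.Dict.mk [("Lab_inside", (0 : Int)), ("Lab_outside", 1)]).getD kv.1 2) = pvKey := by
    funext kv
    simp [rank_getD, pvKey]
  have hbuck : PySem.List.sorted l pvKey false =
      l.filter (fun p => pvKey p == 0) ++ l.filter (fun p => pvKey p == 1)
        ++ l.filter (fun p => pvKey p == 2) := by
    apply sorted_bucket3
    intro p _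
    unfold pvKey
    split_ifs <;> simp
  have hfeq0 : l.filter (fun p => pvKey p == 0) = l.filter (fun p => p.1 == "Lab_inside") := by
    apply List.filter_congr
    intro p _
    by_cases hA : p.1 = "Lab_inside"
    · simp [pvKey, hA]
    · by_cases hB : p.1 = "Lab_outside" <;> simp [pvKey, hA, hB]
  have hfeq1 : l.filter (fun p => pvKey p == 1) = l.filter (fun p => p.1 == "Lab_outside") := by
    apply List.filter_congr
    intro p _
    by_cases hA : p.1 = "Lab_inside"
    · simp [pvKey, hA]
    · by_cases hB : p.1 = "Lab_outside" <;> simp [pvKey, hA, hB]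
  have hfeq2 : l.filter (fun p => pvKey p == 2)
      = l.filter (fun p => !(p.1 == "Lab_inside") && !(p.1 == "Lab_outside")) := by
    apply List.filter_congr
    intro p _
    by_cases hA : p.1 = "Lab_inside"
    · simp [pvKey, hA]
    · by_cases hB : p.1 = "Lab_outside" <;> simp [pvKey, hA, hB]
  have hperm : (PySem.List.sorted l pvKey false).Perm l := PySem.List.sorted_perm l pvKey false
  have hndT : ((pvTarget l).map Prod.fst).Nodup := by
    have hp2 : ((PySem.List.sorted l pvKey false).map Prod.fst).Perm (l.map Prod.fst) :=
      hperm.map Prod.fst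
    have hnds : ((PySem.List.sorted l pvKey false).map Prod.fst).Nodup := hp2.nodup_iff.mpr hnd
    rw [hbuck, hfeq0, hfeq1, hfeq2] at hnds
    unfold pvTarget
    rw [List.map_take]
    exact (List.take_sublist 2 _).nodup hnds
  unfold pick_two_alt
  simp only [hkey]
  rw [hbuck, hfeq0, hfeq1, hfeq2]
  rw [PySem.List.slice_to _ (by norm_num)]
  have h2 : ((2 : Int)).toNat = 2 := rfl
  rw [h2]
  have hfresh := PySem.Dict.items_foldl_insert_fresh (pvTarget l)
    (Prod.fst) (Prod.snd) (PySem.Dict.empty : PySem.Dict String String)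
    (by intro a _; simp [PySem.Dict.contains_empty])
    hndT
  unfold pvTarget at hfresh ⊢
  simpa [PySem.Dict.ofList, PySem.Dict.update, items_empty] using hfresh

-- ===== VERDICT (by name: the statement is the Claim_ definition above) =====
theorem pick_two_spec : Claim_equal_pick_two := by
  intro l _ hpre
  show pick_two l = pick_two_alt l
  rw [pick_two_eq_target l hpre, pick_two_alt_eq_target l hpre]
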